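-- pv_equiv track=rewrite | github.com/jeff87654/Lifting | scan_6_5_5_2_summary.py | is_projection_transitive
-- ===== SOURCE A (Python) =====
-- def is_projection_transitive(gens, block):
--     block_set = set(block)
--     start = block[0]
--     orbit = {start}
--     stack = [start]
--     while stack:
--         x = stack.pop()
--         for g in gens:
--             y = g.get(x, x)
--             if y in block_set and y not in orbit:
--                 orbit.add(y)
--                 stack.append(y)
--     return orbit == block_set
-- ===== SOURCE B (Python) =====
-- def is_projection_transitive(gens, block):
--     # Fixed-count closure: |set(block)| rounds, each unioning in the whole
--     # orbit's image (restricted to the block) — no worklist, no changed flag.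
--     block_set = set(block)
--     orbit = {block[0]}
--     for _ in range(len(block_set)):
--         orbit |= {g.get(x, x) for x in orbit for g in gens} & block_set
--     return orbit == block_set
-- ===== Notes on version B (the rewrite author's own statement) =====
-- stated objective: alternative
-- what changed: Replaces A's DFS worklist/stack with a fixed-count round-based closure: |set(block)| unconditional rounds, each building the set-comprehension image of the whole current orbit, intersecting it with the block set and unioning it in; no stack, no per-element visited test inside the loop, no termination flag.
import Mathlib
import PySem

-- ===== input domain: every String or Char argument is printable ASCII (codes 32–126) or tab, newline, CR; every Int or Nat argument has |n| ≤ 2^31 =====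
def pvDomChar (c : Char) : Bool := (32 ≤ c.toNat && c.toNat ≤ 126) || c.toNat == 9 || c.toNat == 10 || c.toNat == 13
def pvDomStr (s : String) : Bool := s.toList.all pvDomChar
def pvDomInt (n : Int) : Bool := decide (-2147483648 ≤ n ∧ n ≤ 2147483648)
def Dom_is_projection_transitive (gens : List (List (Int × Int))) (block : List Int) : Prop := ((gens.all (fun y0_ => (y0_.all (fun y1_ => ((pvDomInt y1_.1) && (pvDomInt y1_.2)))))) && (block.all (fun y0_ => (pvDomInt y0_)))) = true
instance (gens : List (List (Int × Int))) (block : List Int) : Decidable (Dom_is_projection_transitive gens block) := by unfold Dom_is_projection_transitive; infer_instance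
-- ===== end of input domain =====

-- B replaces A's DFS worklist/stack by a fixed-count round-based closure
-- (image of the whole orbit ∩ block, unioned in, |set(block)| times);
-- objective: alternative decomposition, same result.

-- shared primitive: the port of `g.get(x, x)` (first-match association-list lookup)
def pvStep (g : List (Int × Int)) (x : Int) : Int :=
  PySem.Dict.getD (PySem.Dict.mk g) x x

-- ===== PORT A =====
-- A's inner `for g in gens:` body, acting on the state (orbit, stack)
def pvAccA (blockset : PySem.Set Int) (x : Int)
    (st : PySem.Set Int × List Int) (g : List (Int × Int)) : PySem.Set Int × List Int :=
  let y := pvStep g x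
  if PySem.Set.contains blockset y && !(PySem.Set.contains st.1 y)
  then (PySem.Set.add st.1 y, y :: st.2) else st

-- A's `while stack:` loop; the stack is kept head-first (cons = append, head = pop(),
-- the same LIFO discipline as the Python list).  The fuel `block.length + 1` is a
-- totality guard only: the loop runs at most |set(block)| times (proved below).
def pvLoopA (gens : List (List (Int × Int))) (blockset : PySem.Set Int) :
    Nat → PySem.Set Int → List Int → PySem.Set Int
  | 0, orbit, _ => orbit
  | _ + 1, orbit, [] => orbit
  | fuel + 1, orbit, x :: stack =>
    let st := gens.foldl (pvAccA blockset x) (orbit, stack)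
    pvLoopA gens blockset fuel st.1 st.2

def is_projection_transitive (gens : List (List (Int × Int))) (block : List Int) : Bool :=
  let blockset := PySem.Set.ofList block
  match block with
  | [] => false   -- block[0] raises IndexError; excluded by Pre_
  | start :: _ =>
    PySem.Set.equal
      (pvLoopA gens blockset (block.length + 1)
        (PySem.Set.add PySem.Set.empty start) [start])
      blockset

-- ===== PORT B =====
-- `{g.get(x, x) for x in orbit for g in gens}`: the set comprehension, built by
-- folding Set.add over the snapshot (the result is consumed only as a set)
def pvImageB (gens : List (List (Int × Int))) (orbit : PySem.Set Int) : PySem.Set Int :=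
  orbit.foldl
    (fun acc x => gens.foldl (fun acc g => PySem.Set.add acc (pvStep g x)) acc)
    PySem.Set.empty

-- one round: `orbit |= image & block_set`
def pvRoundB (gens : List (List (Int × Int))) (blockset : PySem.Set Int)
    (orbit : PySem.Set Int) : PySem.Set Int :=
  PySem.Set.union orbit (PySem.Set.inter (pvImageB gens orbit) blockset)

-- `for _ in range(len(block_set)):` — a fixed, unconditional number of rounds
def pvRoundsB (gens : List (List (Int × Int))) (blockset : PySem.Set Int) :
    Nat → PySem.Set Int → PySem.Set Int
  | 0, orbit => orbit
  | n + 1, orbit => pvRoundsB gens blockset n (pvRoundB gens blockset orbit)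

def is_projection_transitive_alt (gens : List (List (Int × Int))) (block : List Int) : Bool :=
  let blockset := PySem.Set.ofList block
  match block with
  | [] => false   -- block[0] raises IndexError; excluded by Pre_
  | start :: _ =>
    PySem.Set.equal
      (pvRoundsB gens blockset blockset.length (PySem.Set.add PySem.Set.empty start))
      blockset

-- ===== PRECONDITION & SPEC =====
-- Pre_ excludes only the empty block, on which the Python A raises IndexError (block[0]).
def Pre_is_projection_transitive (gens : List (List (Int × Int))) (block : List Int) : Prop :=
  block ≠ []
instance (gens : List (List (Int × Int))) (block : List Int) : Decidable (Pre_is_projection_transitive gens block) := by unfold Pre_is_projection_transitive; infer_instance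

def pvWitness_is_projection_transitive : (List (List (Int × Int))) × List Int :=
  ([[(0, 1), (1, 0)]], [0, 1])

def Spec_is_projection_transitive (gens : List (List (Int × Int))) (block : List Int) (out : Bool) : Prop := out = is_projection_transitive_alt gens block
instance (gens : List (List (Int × Int))) (block : List Int) (out : Bool) : Decidable (Spec_is_projection_transitive gens block out) := by unfold Spec_is_projection_transitive; infer_instance

-- ===== CLAIM (what is proved, stated in full; the proofs are below) =====
def Claim_equal_is_projection_transitive : Prop := ∀ (gens : List (List (Int × Int))) (block : List Int), Dom_is_projection_transitive gens block → Pre_is_projection_transitive gens block → Spec_is_projection_transitive gens block (is_projection_transitive gens block)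

-- ===== LEMMAS AND PROOFS =====

def pvClosed (gens : List (List (Int × Int))) (block : List Int) (T : List Int) : Prop :=
  ∀ z ∈ T, ∀ g ∈ gens, pvStep g z ∈ block → pvStep g z ∈ T

-- ---- A-side lemmas ----

lemma accA_mem (block : List Int) (x : Int) (st : PySem.Set Int × List Int)
    (g : List (Int × Int)) (z : Int) :
    z ∈ (pvAccA (PySem.Set.ofList block) x st g).1 ↔
      z ∈ st.1 ∨ (z = pvStep g x ∧ z ∈ block) := by
  unfold pvAccA
  by_cases hb : pvStep g x ∈ block <;> by_cases hc : pvStep g x ∈ st.1 <;>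
    simp [PySem.Set.mem_ofList, hb, hc] <;> aesop

lemma accA_stack (block : List Int) (x : Int) (st : PySem.Set Int × List Int)
    (g : List (Int × Int)) (z : Int)
    (h : z ∈ (pvAccA (PySem.Set.ofList block) x st g).2) :
    z ∈ st.2 ∨ z ∈ (pvAccA (PySem.Set.ofList block) x st g).1 := by
  unfold pvAccA at *
  by_cases hb : pvStep g x ∈ block <;> by_cases hc : pvStep g x ∈ st.1 <;>
    simp [PySem.Set.mem_ofList, hb, hc] at * <;> tauto

lemma accA_stack_mono (bs : PySem.Set Int) (x : Int) (st : PySem.Set Int × List Int)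
    (g : List (Int × Int)) (z : Int) (h : z ∈ st.2) : z ∈ (pvAccA bs x st g).2 := by
  unfold pvAccA
  by_cases hb : pvStep g x ∈ bs <;> by_cases hc : pvStep g x ∈ st.1 <;> simp [hb, hc, h]

lemma accA_count (bs : PySem.Set Int) (x : Int) (st : PySem.Set Int × List Int)
    (g : List (Int × Int)) (hnd : st.1.Nodup) :
    (pvAccA bs x st g).1.Nodup ∧
    (pvAccA bs x st g).1.length + st.2.length = (pvAccA bs x st g).2.length + st.1.length := by
  unfold pvAccA
  by_cases hb : pvStep g x ∈ bs <;> by_cases hc : pvStep g x ∈ st.1 <;>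
    simp [hb, hc, hnd, List.nodup_append]
  · exact Nat.add_comm _ _
  · refine ⟨fun a ha heq => hc (heq ▸ ha), by omega⟩
  · exact Nat.add_comm _ _
  · exact Nat.add_comm _ _

lemma accA_stack_new (bs : PySem.Set Int) (x : Int) (st : PySem.Set Int × List Int)
    (g : List (Int × Int)) (z : Int) (h : z ∈ (pvAccA bs x st g).1) :
    z ∈ st.1 ∨ z ∈ (pvAccA bs x st g).2 := by
  unfold pvAccA at *
  by_cases hb : pvStep g x ∈ bs <;> by_cases hc : pvStep g x ∈ st.1 <;>
    simp [hb, hc] at h ⊢ <;> tauto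

lemma foldA_mem (block : List Int) (x : Int) (gs : List (List (Int × Int)))
    (st : PySem.Set Int × List Int) (z : Int) :
    z ∈ (gs.foldl (pvAccA (PySem.Set.ofList block) x) st).1 ↔
      z ∈ st.1 ∨ ∃ g ∈ gs, z = pvStep g x ∧ z ∈ block := by
  induction gs generalizing st with
  | nil => simp
  | cons g gs ih =>
    simp only [List.foldl_cons, ih, accA_mem]
    constructor
    · rintro (((h | h) | ⟨g', hg', h⟩))
      · exact Or.inl h
      · exact Or.inr ⟨g, by simp, h⟩
      · exact Or.inr ⟨g', by simp [hg'], h⟩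
    · rintro (h | ⟨g', hg', h⟩)
      · exact Or.inl (Or.inl h)
      · rcases List.mem_cons.mp hg' with rfl | hg'
        · exact Or.inl (Or.inr h)
        · exact Or.inr ⟨g', hg', h⟩

lemma foldA_stack (block : List Int) (x : Int) (gs : List (List (Int × Int)))
    (st : PySem.Set Int × List Int) (z : Int)
    (h : z ∈ (gs.foldl (pvAccA (PySem.Set.ofList block) x) st).2) :
    z ∈ st.2 ∨ z ∈ (gs.foldl (pvAccA (PySem.Set.ofList block) x) st).1 := by
  induction gs generalizing st with
  | nil => exact Or.inl h
  | cons g gs ih =>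
    simp only [List.foldl_cons] at h ⊢
    rcases ih _ h with h' | h'
    · rcases accA_stack block x st g z h' with h'' | h''
      · exact Or.inl h''
      · exact Or.inr ((foldA_mem block x gs _ z).mpr (Or.inl h''))
    · exact Or.inr h'

lemma foldA_stack_mono (bs : PySem.Set Int) (x : Int) (gs : List (List (Int × Int)))
    (st : PySem.Set Int × List Int) (z : Int) (h : z ∈ st.2) :
    z ∈ (gs.foldl (pvAccA bs x) st).2 := by
  induction gs generalizing st with
  | nil => exact h
  | cons g gs ih => exact ih _ (accA_stack_mono bs x st g z h)

lemma foldA_new (bs : PySem.Set Int) (x : Int) (gs : List (List (Int × Int)))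
    (st : PySem.Set Int × List Int) (z : Int)
    (h : z ∈ (gs.foldl (pvAccA bs x) st).1) :
    z ∈ st.1 ∨ z ∈ (gs.foldl (pvAccA bs x) st).2 := by
  induction gs generalizing st with
  | nil => exact Or.inl h
  | cons g gs ih =>
    simp only [List.foldl_cons] at h ⊢
    rcases ih _ h with h' | h'
    · rcases accA_stack_new bs x st g z h' with h'' | h''
      · exact Or.inl h''
      · exact Or.inr (foldA_stack_mono bs x gs _ z h'')
    · exact Or.inr h'

lemma foldA_count (bs : PySem.Set Int) (x : Int) (gs : List (List (Int × Int)))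
    (st : PySem.Set Int × List Int) (hnd : st.1.Nodup) :
    (gs.foldl (pvAccA bs x) st).1.Nodup ∧
    (gs.foldl (pvAccA bs x) st).1.length + st.2.length =
      (gs.foldl (pvAccA bs x) st).2.length + st.1.length := by
  induction gs generalizing st with
  | nil => exact ⟨hnd, Nat.add_comm _ _⟩
  | cons g gs ih =>
    obtain ⟨h1, h2⟩ := accA_count bs x st g hnd
    obtain ⟨h3, h4⟩ := ih (pvAccA bs x st g) h1
    exact ⟨h3, by simp only [List.foldl_cons]; omega⟩

lemma nodup_length_le (block : List Int) (l : List Int) (hnd : l.Nodup)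
    (hsub : ∀ z ∈ l, z ∈ block) : l.length ≤ (PySem.Set.ofList block).length := by
  exact List.Subperm.length_le
    (hnd.subperm (fun z hz => (PySem.Set.mem_ofList _ _).mpr (hsub z hz)))

lemma loopA_subset (gens : List (List (Int × Int))) (block : List Int) (T : List Int)
    (hT : pvClosed gens block T) :
    ∀ (fuel : Nat) (orbit : PySem.Set Int) (stack : List Int),
      (∀ z ∈ orbit, z ∈ T) → (∀ z ∈ stack, z ∈ T) →
      ∀ z ∈ pvLoopA gens (PySem.Set.ofList block) fuel orbit stack, z ∈ T := by
  intro fuel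
  induction fuel with
  | zero => intro orbit stack h1 _ z hz; exact h1 z hz
  | succ fuel ih =>
    intro orbit stack h1 h2 z hz
    match stack with
    | [] => exact h1 z hz
    | x :: stack =>
      simp only [pvLoopA] at hz
      have hx : x ∈ T := h2 x (by simp)
      have horb : ∀ w ∈ (gens.foldl (pvAccA (PySem.Set.ofList block) x) (orbit, stack)).1, w ∈ T := by
        intro w hw
        rcases (foldA_mem block x gens (orbit, stack) w).mp hw with hw' | ⟨g, hg, rfl, hb⟩
        · exact h1 w hw'
        · exact hT x hx g hg hb
      have hstk : ∀ w ∈ (gens.foldl (pvAccA (PySem.Set.ofList block) x) (orbit, stack)).2, w ∈ T := by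
        intro w hw
        rcases foldA_stack block x gens (orbit, stack) w hw with hw' | hw'
        · exact h2 w (by simp [hw'])
        · exact horb w hw'
      exact ih _ _ horb hstk z hz

lemma loopA_final (gens : List (List (Int × Int))) (block : List Int) :
    ∀ (fuel : Nat) (orbit : PySem.Set Int) (stack : List Int),
      orbit.Nodup → (∀ z ∈ orbit, z ∈ block) → (∀ z ∈ stack, z ∈ orbit) →
      (∀ z ∈ orbit, z ∉ stack → ∀ g ∈ gens, pvStep g z ∈ block → pvStep g z ∈ orbit) →
      stack.length + ((PySem.Set.ofList block).length - orbit.length) ≤ fuel →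
      pvClosed gens block (pvLoopA gens (PySem.Set.ofList block) fuel orbit stack) ∧
      ∀ z ∈ orbit, z ∈ pvLoopA gens (PySem.Set.ofList block) fuel orbit stack := by
  intro fuel
  induction fuel with
  | zero =>
    intro orbit stack hnd hblk hso hcl hfuel
    have : stack = [] := List.length_eq_zero_iff.mp (by omega)
    subst this
    exact ⟨fun z hz => hcl z hz (by simp), fun z hz => hz⟩
  | succ fuel ih =>
    intro orbit stack hnd hblk hso hcl hfuel
    match stack with
    | [] => exact ⟨fun z hz => hcl z hz (by simp), fun z hz => hz⟩
    | x :: stack =>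
      simp only [pvLoopA]
      set st := gens.foldl (pvAccA (PySem.Set.ofList block) x) (orbit, stack) with hst
      obtain ⟨hnd', hcount⟩ := foldA_count (PySem.Set.ofList block) x gens (orbit, stack) hnd
      have hmemst : ∀ w, w ∈ st.1 ↔ w ∈ orbit ∨ ∃ g ∈ gens, w = pvStep g x ∧ w ∈ block :=
        fun w => foldA_mem block x gens (orbit, stack) w
      have hblk' : ∀ z ∈ st.1, z ∈ block := by
        intro z hz
        rcases (hmemst z).mp hz with h | ⟨g, hg, rfl, hb⟩
        · exact hblk z h
        · exact hb
      have hmono : ∀ z ∈ orbit, z ∈ st.1 := fun z hz => (hmemst z).mpr (Or.inl hz)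
      have hso' : ∀ z ∈ st.2, z ∈ st.1 := by
        intro z hz
        rcases foldA_stack block x gens (orbit, stack) z hz with h | h
        · exact hmono z (hso z (by simp [h]))
        · exact h
      have hcl' : ∀ z ∈ st.1, z ∉ st.2 → ∀ g ∈ gens, pvStep g z ∈ block → pvStep g z ∈ st.1 := by
        intro z hz hns g hg hb
        by_cases hzx : z = x
        · subst hzx
          exact (hmemst _).mpr (Or.inr ⟨g, hg, rfl, hb⟩)
        · rcases foldA_new (PySem.Set.ofList block) x gens (orbit, stack) z hz with h | h
          · have hzns : z ∉ stack := fun hmem =>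
              hns (foldA_stack_mono (PySem.Set.ofList block) x gens (orbit, stack) z hmem)
            have : pvStep g z ∈ orbit :=
              hcl z h (by simp [hzns, hzx]) g hg hb
            exact hmono _ this
          · exact absurd h hns
      have hlen1 : st.1.length ≤ (PySem.Set.ofList block).length :=
        nodup_length_le block st.1 hnd' hblk'
      have hlen0 : orbit.length ≤ (PySem.Set.ofList block).length :=
        nodup_length_le block orbit hnd hblk
      have hcount' : st.1.length + stack.length = st.2.length + orbit.length := by
        simpa [← hst] using hcount
      have hfuel' : st.2.length + ((PySem.Set.ofList block).length - st.1.length) ≤ fuel := by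
        simp only [List.length_cons] at hfuel
        omega
      obtain ⟨hA, hB⟩ := ih st.1 st.2 hnd' hblk' hso' hcl' hfuel'
      exact ⟨hA, fun z hz => hB z (hmono z hz)⟩

-- ---- B-side lemmas ----

lemma imageB_mem (gens : List (List (Int × Int))) (orbit : PySem.Set Int) (z : Int) :
    z ∈ pvImageB gens orbit ↔ ∃ x ∈ orbit, ∃ g ∈ gens, z = pvStep g x := by
  unfold pvImageB
  have inner : ∀ (acc : PySem.Set Int) (x : Int),
      ∀ w, w ∈ gens.foldl (fun acc g => PySem.Set.add acc (pvStep g x)) acc ↔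
        w ∈ acc ∨ ∃ g ∈ gens, w = pvStep g x := by
    intro acc x w
    exact PySem.Set.mem_foldl_add gens (fun g => pvStep g x) acc w
  have outer : ∀ (xs : List Int) (acc : PySem.Set Int),
      z ∈ xs.foldl (fun acc x => gens.foldl (fun acc g => PySem.Set.add acc (pvStep g x)) acc) acc ↔
        z ∈ acc ∨ ∃ x ∈ xs, ∃ g ∈ gens, z = pvStep g x := by
    intro xs
    induction xs with
    | nil => simp
    | cons x xs ih =>
      intro acc
      simp only [List.foldl_cons, ih, inner]
      constructor
      · rintro ((h | ⟨g, hg, h⟩) | ⟨x', hx', h⟩)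
        · exact Or.inl h
        · exact Or.inr ⟨x, by simp, g, hg, h⟩
        · exact Or.inr ⟨x', by simp [hx'], h⟩
      · rintro (h | ⟨x', hx', h⟩)
        · exact Or.inl (Or.inl h)
        · rcases List.mem_cons.mp hx' with rfl | hx'
          · exact Or.inl (Or.inr h)
          · exact Or.inr ⟨x', hx', h⟩
  simpa using outer orbit PySem.Set.empty

lemma roundB_mem (gens : List (List (Int × Int))) (block : List Int)
    (orbit : PySem.Set Int) (z : Int) :
    z ∈ pvRoundB gens (PySem.Set.ofList block) orbit ↔
      z ∈ orbit ∨ (z ∈ block ∧ ∃ x ∈ orbit, ∃ g ∈ gens, z = pvStep g x) := by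
  unfold pvRoundB
  rw [PySem.Set.mem_union, PySem.Set.mem_inter, imageB_mem, PySem.Set.mem_ofList]
  tauto

lemma roundB_nodup (gens : List (List (Int × Int))) (bs : PySem.Set Int)
    (orbit : PySem.Set Int) (hnd : orbit.Nodup) :
    (pvRoundB gens bs orbit).Nodup :=
  PySem.Set.nodup_union orbit _ hnd

lemma roundB_prefix (gens : List (List (Int × Int))) (bs : PySem.Set Int)
    (orbit : PySem.Set Int) : orbit <+: pvRoundB gens bs orbit := by
  unfold pvRoundB PySem.Set.union
  rw [PySem.Set.update_eq_append_filter]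
  exact List.prefix_append _ _

lemma roundB_fix_closed (gens : List (List (Int × Int))) (block : List Int)
    (orbit : PySem.Set Int)
    (hfix : pvRoundB gens (PySem.Set.ofList block) orbit = orbit) :
    pvClosed gens block orbit := by
  intro z hz g hg hb
  have : pvStep g z ∈ pvRoundB gens (PySem.Set.ofList block) orbit :=
    (roundB_mem gens block orbit _).mpr (Or.inr ⟨hb, z, hz, g, hg, rfl⟩)
  rwa [hfix] at this

lemma roundsB_of_fix (gens : List (List (Int × Int))) (bs : PySem.Set Int)
    (orbit : PySem.Set Int) (hfix : pvRoundB gens bs orbit = orbit) :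
    ∀ n, pvRoundsB gens bs n orbit = orbit := by
  intro n
  induction n with
  | zero => rfl
  | succ n ih => simp only [pvRoundsB, hfix, ih]

lemma roundsB_subset (gens : List (List (Int × Int))) (block : List Int) (T : List Int)
    (hT : pvClosed gens block T) :
    ∀ (n : Nat) (orbit : PySem.Set Int), (∀ z ∈ orbit, z ∈ T) →
      ∀ z ∈ pvRoundsB gens (PySem.Set.ofList block) n orbit, z ∈ T := by
  intro n
  induction n with
  | zero => intro orbit h z hz; exact h z hz
  | succ n ih =>
    intro orbit h z hz
    simp only [pvRoundsB] at hz
    refine ih _ ?_ z hz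
    intro w hw
    rcases (roundB_mem gens block orbit w).mp hw with h' | ⟨hb, x, hx, g, hg, rfl⟩
    · exact h w h'
    · exact hT x (h x hx) g hg hb

lemma roundsB_final (gens : List (List (Int × Int))) (block : List Int) :
    ∀ (n : Nat) (orbit : PySem.Set Int),
      orbit.Nodup → (∀ z ∈ orbit, z ∈ block) →
      (PySem.Set.ofList block).length ≤ n + orbit.length →
      pvClosed gens block (pvRoundsB gens (PySem.Set.ofList block) n orbit) ∧
      ∀ z ∈ orbit, z ∈ pvRoundsB gens (PySem.Set.ofList block) n orbit := by
  intro n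
  induction n with
  | zero =>
    intro orbit hnd hblk hlen
    -- no rounds left: the orbit already has full size, so the next round is a fixpoint
    have hnd' := roundB_nodup gens (PySem.Set.ofList block) orbit hnd
    have hblk' : ∀ z ∈ pvRoundB gens (PySem.Set.ofList block) orbit, z ∈ block := by
      intro z hz
      rcases (roundB_mem gens block orbit z).mp hz with h | ⟨hb, _⟩
      · exact hblk z h
      · exact hb
    have hle := nodup_length_le block _ hnd' hblk'
    have hpre := roundB_prefix gens (PySem.Set.ofList block) orbit
    have hfix : pvRoundB gens (PySem.Set.ofList block) orbit = orbit :=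
      (hpre.eq_of_length_le (by omega)).symm
    exact ⟨roundB_fix_closed gens block orbit hfix, fun z hz => hz⟩
  | succ n ih =>
    intro orbit hnd hblk hlen
    simp only [pvRoundsB]
    set O' := pvRoundB gens (PySem.Set.ofList block) orbit with hO'
    have hnd' := roundB_nodup gens (PySem.Set.ofList block) orbit hnd
    have hblk' : ∀ z ∈ O', z ∈ block := by
      intro z hz
      rcases (roundB_mem gens block orbit z).mp hz with h | ⟨hb, _⟩
      · exact hblk z h
      · exact hb
    have hpre := roundB_prefix gens (PySem.Set.ofList block) orbit
    by_cases hfix : O' = orbit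
    · rw [hfix, roundsB_of_fix gens (PySem.Set.ofList block) orbit (hO' ▸ hfix) n]
      exact ⟨roundB_fix_closed gens block orbit (hO' ▸ hfix), fun z hz => hz⟩
    · have hgrow : orbit.length < O'.length := by
        rcases Nat.lt_or_ge orbit.length O'.length with h | h
        · exact h
        · exact absurd (hpre.eq_of_length_le h) (fun e => hfix e.symm)
      obtain ⟨hA, hB⟩ := ih O' hnd' hblk' (by omega)
      exact ⟨hA, fun z hz => hB z (hpre.subset hz)⟩

-- ===== VERDICT (by name: the statement is the Claim_ definition above) =====
theorem is_projection_transitive_spec : Claim_equal_is_projection_transitive := by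
  intro gens block _ hpre
  unfold Spec_is_projection_transitive
  match block with
  | [] => exact absurd rfl hpre
  | start :: rest =>
    simp only [is_projection_transitive, is_projection_transitive_alt]
    have h0 : PySem.Set.add PySem.Set.empty start = [start] := rfl
    rw [h0]
    set block := start :: rest with hblock
    have hbound : (PySem.Set.ofList block).length ≤ block.length := PySem.Set.length_ofList_le block
    have hbpos : 1 ≤ (PySem.Set.ofList block).length := by
      have : start ∈ PySem.Set.ofList block := (PySem.Set.mem_ofList _ _).mpr (by simp [hblock])
      exact List.length_pos_of_mem this
    have hstart : start ∈ block := by simp [hblock]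
    have hA := loopA_final gens block (block.length + 1) [start] [start]
      (by simp) (by simpa using hstart) (by simp) (by simp)
      (by simp only [List.length_cons, List.length_nil]; omega)
    have hB := roundsB_final gens block (PySem.Set.ofList block).length [start]
      (by simp) (by simpa using hstart)
      (by simp only [List.length_cons, List.length_nil]; omega)
    set OA := pvLoopA gens (PySem.Set.ofList block) (block.length + 1) [start] [start] with hOA
    set OB := pvRoundsB gens (PySem.Set.ofList block) (PySem.Set.ofList block).length [start] with hOB
    have hAB : ∀ z ∈ OA, z ∈ OB :=
      loopA_subset gens block OB hB.1 (block.length + 1) [start] [start]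
        (by intro z hz; rcases List.mem_singleton.mp hz with rfl; exact hB.2 z (by simp))
        (by intro z hz; rcases List.mem_singleton.mp hz with rfl; exact hB.2 z (by simp))
    have hBA : ∀ z ∈ OB, z ∈ OA :=
      roundsB_subset gens block OA hA.1 (PySem.Set.ofList block).length [start]
        (by intro z hz; rcases List.mem_singleton.mp hz with rfl; exact hA.2 z (by simp))
    have hiff : (PySem.Set.equal OA (PySem.Set.ofList block) = true) ↔
        (PySem.Set.equal OB (PySem.Set.ofList block) = true) := by
      rw [PySem.Set.equal_iff, PySem.Set.equal_iff]
      constructor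
      · intro h z
        exact ⟨fun hz => (h z).mp (hBA z hz), fun hz => hAB z ((h z).mpr hz)⟩
      · intro h z
        exact ⟨fun hz => (h z).mp (hAB z hz), fun hz => hBA z ((h z).mpr hz)⟩
    exact Bool.coe_iff_coe.mp hiff
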